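-- pv_equiv track=rewrite | github.com/Vincent-Therrien/stelaro | stelaro/data/format.py | encode_tetramer
-- ===== SOURCE A (Python) =====
-- BASE_TO_BITS = {
--     'A': 0b00,
--     'C': 0b01,
--     'G': 0b10,
--     'T': 0b11,
-- }
--
-- def encode_tetramer(sequence: str) -> list[int]:
--     """Convert a nucleotide sequence into tetramer encoding.
--
--     Args:
--         sequence: Nucleotide sequence.
--
--     Returns: 4-mer encoded sequence.
--     """
--     if any(base not in 'ACGT' for base in sequence):
--         raise ValueError("Input must be a 4-character string containing only A, C, G, T.")
--
--     def encode_four_nucleotides(tetramer):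
--         result = 0
--         for base in tetramer:
--             result = (result << 2) | BASE_TO_BITS[base]
--         return result
--
--     tetramers = [sequence[i:i+4] for i in range(0, len(sequence), 4)]
--     return [encode_four_nucleotides(t) for t in tetramers]
-- ===== SOURCE B (Python) =====
-- BASE_TO_BITS = {
--     'A': 0b00,
--     'C': 0b01,
--     'G': 0b10,
--     'T': 0b11,
-- }
--
--
-- def encode_tetramer(sequence: str) -> list[int]:
--     """Convert a nucleotide sequence into tetramer encoding (single pass)."""
--     if any(base not in 'ACGT' for base in sequence):
--         raise ValueError("Input must be a 4-character string containing only A, C, G, T.")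
--     result = []
--     acc = 0
--     count = 0
--     for base in sequence:
--         acc = (acc << 2) | BASE_TO_BITS[base]
--         count += 1
--         if count == 4:
--             result.append(acc)
--             acc = 0
--             count = 0
--     if count:
--         result.append(acc)
--     return result
-- ===== Notes on version B (the rewrite author's own statement) =====
-- stated objective: alternative
-- what changed: Replaces chunk-the-string-then-map (building a list of 4-char substrings and folding each) by one single pass over the characters with an accumulator and a counter that flushes every 4 bases and once at the end.
import Mathlib
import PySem

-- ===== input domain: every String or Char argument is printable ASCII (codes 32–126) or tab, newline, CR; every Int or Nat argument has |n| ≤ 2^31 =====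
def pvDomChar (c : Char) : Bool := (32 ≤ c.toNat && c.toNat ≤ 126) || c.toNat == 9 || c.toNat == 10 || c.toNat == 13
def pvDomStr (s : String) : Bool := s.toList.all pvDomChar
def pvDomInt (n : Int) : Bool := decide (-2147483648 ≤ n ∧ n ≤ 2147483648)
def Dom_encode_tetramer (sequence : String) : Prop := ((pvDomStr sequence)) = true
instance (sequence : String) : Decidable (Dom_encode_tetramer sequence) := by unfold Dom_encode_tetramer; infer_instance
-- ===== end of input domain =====

-- B replaces A's chunk-then-map decomposition by one single accumulator/counter pass; alternative, same cost.

-- ===== PORT A =====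
-- module constant BASE_TO_BITS
def pvBaseToBits : PySem.Dict Char Int :=
  PySem.Dict.ofList [('A', 0), ('C', 1), ('G', 2), ('T', 3)]

-- inner helper encode_four_nucleotides; BASE_TO_BITS[base] never misses under Pre_, ported as getD
def pvEncodeFour (tetramer : List Char) : Int :=
  tetramer.foldl (fun result base => PySem.Int.bor (result <<< (2 : Nat)) (pvBaseToBits.getD base 0)) 0

def encode_tetramer (sequence : String) : List Int :=
  let chars := sequence.toList
  let tetramers := (PySem.List.pyRange 0 (chars.length : Int) 4).map
    (fun i => PySem.List.slice chars (some i) (some (i + 4)))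
  tetramers.map pvEncodeFour

-- ===== PORT B =====
def pvStepB (s : Int × Int × List Int) (base : Char) : Int × Int × List Int :=
  let acc := PySem.Int.bor (s.1 <<< (2 : Nat)) (pvBaseToBits.getD base 0)
  let count := s.2.1 + 1
  if count = 4 then (0, 0, s.2.2 ++ [acc]) else (acc, count, s.2.2)

def encode_tetramer_alt (sequence : String) : List Int :=
  let s := sequence.toList.foldl pvStepB (0, 0, [])
  if s.2.1 > 0 then s.2.2 ++ [s.1] else s.2.2

-- ===== PRECONDITION & SPEC =====
-- Pre_: both A and B raise ValueError on any character outside 'ACGT'; exactly those inputs are excluded.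
def Pre_encode_tetramer (sequence : String) : Prop :=
  sequence.toList.all (fun c => c ∈ (['A', 'C', 'G', 'T'] : List Char)) = true
instance (sequence : String) : Decidable (Pre_encode_tetramer sequence) := by
  unfold Pre_encode_tetramer; infer_instance

def pvWitness_encode_tetramer : String := "ACGTA"

def Spec_encode_tetramer (sequence : String) (out : List Int) : Prop := out = encode_tetramer_alt sequence
instance (sequence : String) (out : List Int) : Decidable (Spec_encode_tetramer sequence out) := by unfold Spec_encode_tetramer; infer_instance

-- ===== CLAIM (what is proved, stated in full; the proofs are below) =====
def Claim_equal_encode_tetramer : Prop := ∀ (sequence : String), Dom_encode_tetramer sequence → Pre_encode_tetramer sequence → Spec_encode_tetramer sequence (encode_tetramer sequence)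

-- ===== LEMMAS AND PROOFS =====

-- the common chunk recursion both ports are reduced to
def pvChunks : List Char → List Int
  | [] => []
  | [a] => [pvEncodeFour [a]]
  | [a, b] => [pvEncodeFour [a, b]]
  | [a, b, c] => [pvEncodeFour [a, b, c]]
  | a :: b :: c :: d :: t => pvEncodeFour [a, b, c, d] :: pvChunks t

theorem pvChunks_eq (l : List Char) (h : l ≠ []) :
    pvChunks l = pvEncodeFour (l.take 4) :: pvChunks (l.drop 4) := by
  match l with
  | [a] => simp [pvChunks]
  | [a, b] => simp [pvChunks]
  | [a, b, c] => simp [pvChunks]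
  | a :: b :: c :: d :: t => simp [pvChunks]

theorem pyRange4_nil (a b : Int) (h : b ≤ a) : PySem.List.pyRange a b 4 = [] := by
  rw [PySem.List.pyRange_of_pos a b (by norm_num)]
  rw [if_neg (by omega)]
  simp

theorem pyRange4_cons (a b : Int) (h : a < b) :
    PySem.List.pyRange a b 4 = a :: PySem.List.pyRange (a + 4) b 4 := by
  rw [PySem.List.pyRange_of_pos a b (by norm_num),
      PySem.List.pyRange_of_pos (a + 4) b (by norm_num)]
  rw [if_pos h]
  by_cases h4 : a + 4 < b
  · rw [if_pos h4]
    have hc : ((b - a + 4 - 1) / 4).toNat = ((b - (a + 4) + 4 - 1) / 4).toNat + 1 := by omega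
    rw [hc, List.range_succ_eq_map, List.map_cons, List.map_map]
    refine List.cons_eq_cons.mpr ⟨by simp, ?_⟩
    apply List.map_congr_left
    intro k _
    simp [Nat.succ_eq_add_one]
    ring
  · rw [if_neg h4]
    have hc : ((b - a + 4 - 1) / 4).toNat = 1 := by omega
    rw [hc]
    simp

theorem pyRange4_shift (b : Int) :
    PySem.List.pyRange 4 b 4 = (PySem.List.pyRange 0 (b - 4) 4).map (· + 4) := by
  rw [PySem.List.pyRange_of_pos 4 b (by norm_num),
      PySem.List.pyRange_of_pos 0 (b - 4) (by norm_num)]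
  have hiff : (4 < b) ↔ (0 < b - 4) := by omega
  simp only [hiff]
  split_ifs with h
  · have he : b - 4 - 0 + 4 - 1 = b - 4 + 4 - 1 := by ring
    rw [he, List.map_map]
    apply List.map_congr_left
    intro k _
    simp
    ring
  · simp

theorem slice_shift (l : List Char) (i : Int) (hi : 0 ≤ i) :
    PySem.List.slice l (some (i + 4)) (some (i + 4 + 4)) =
      PySem.List.slice (l.drop 4) (some i) (some (i + 4)) := by
  rw [PySem.List.slice_toNat l (by omega) (by omega),
      PySem.List.slice_toNat (l.drop 4) hi (by omega)]
  rw [List.drop_drop]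
  have e2 : (i + 4 + 4).toNat - (i + 4).toNat = (i + 4).toNat - i.toNat := by omega
  have e1 : (i + 4).toNat = 4 + i.toNat := by omega
  rw [e2, e1]

theorem lemA (l : List Char) :
    ((PySem.List.pyRange 0 (l.length : Int) 4).map
      (fun i => PySem.List.slice l (some i) (some (i + 4)))).map pvEncodeFour = pvChunks l := by
  match l with
  | [] => simp [pvChunks, pyRange4_nil 0 0 (by norm_num)]
  | x :: xs =>
    have hlen : (0 : Int) < ((x :: xs).length : Int) := by
      simp only [List.length_cons]; omega
    rw [pyRange4_cons 0 _ hlen, List.map_cons, List.map_cons]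
    have hhead : PySem.List.slice (x :: xs) (some 0) (some (0 + 4)) = (x :: xs).take 4 := by
      rw [show ((0 : Int)) = ((0 : Nat) : Int) by norm_num,
          show (((0 : Nat) : Int) + 4) = ((4 : Nat) : Int) by norm_num,
          PySem.List.slice_natCast]
      simp
    rw [hhead]
    rw [show ((0 : Int) + 4) = 4 by norm_num, pyRange4_shift, List.map_map, List.map_map]
    have htail : (PySem.List.pyRange 0 (((x :: xs).length : Int) - 4) 4).map
        ((pvEncodeFour ∘ fun i => PySem.List.slice (x :: xs) (some i) (some (i + 4))) ∘ (· + 4)) =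
        pvChunks ((x :: xs).drop 4) := by
      by_cases hle : (x :: xs).length ≤ 4
      · have h1 : PySem.List.pyRange 0 (((x :: xs).length : Int) - 4) 4 = [] :=
          pyRange4_nil _ _ (by omega)
        have h2 : (x :: xs).drop 4 = [] := List.drop_eq_nil_of_le (by omega)
        rw [h1, h2]
        simp [pvChunks]
      · have h1 : (((x :: xs).length : Int) - 4) = (((x :: xs).drop 4).length : Int) := by
          have hl : (x :: xs).length = xs.length + 1 := rfl
          have hd : ((x :: xs).drop 4).length = (x :: xs).length - 4 := by simp
          omega
        rw [h1, ← lemA ((x :: xs).drop 4), List.map_map]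
        apply List.map_congr_left
        intro i hi
        have hi0 : 0 ≤ i := ((PySem.List.mem_pyRange_iff_of_pos (by norm_num) i).mp hi).1
        simp only [Function.comp_apply]
        rw [slice_shift (x :: xs) i hi0]
    rw [htail]
    rw [pvChunks_eq (x :: xs) (by simp)]
termination_by l.length
decreasing_by simp [List.length_drop]

-- B's flush of the final loop state
def pvFlush (s : Int × Int × List Int) : List Int :=
  if s.2.1 > 0 then s.2.2 ++ [s.1] else s.2.2

theorem lemB (l : List Char) (out : List Int) :
    pvFlush (l.foldl pvStepB (0, 0, out)) = out ++ pvChunks l := by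
  match l with
  | [] => simp [pvFlush, pvChunks]
  | [a] => simp [pvFlush, pvStepB, pvChunks, pvEncodeFour]
  | [a, b] => simp [pvFlush, pvStepB, pvChunks, pvEncodeFour]
  | [a, b, c] => simp [pvFlush, pvStepB, pvChunks, pvEncodeFour]
  | a :: b :: c :: d :: t =>
    have hstep : (a :: b :: c :: d :: t).foldl pvStepB (0, 0, out) =
        t.foldl pvStepB (0, 0, out ++ [pvEncodeFour [a, b, c, d]]) := by
      simp [pvStepB, pvEncodeFour]
    rw [hstep, lemB t (out ++ [pvEncodeFour [a, b, c, d]])]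
    simp [pvChunks]
termination_by l.length
decreasing_by simp; omega

-- ===== VERDICT (by name: the statement is the Claim_ definition above) =====
theorem encode_tetramer_spec : Claim_equal_encode_tetramer := by
  intro sequence _ _
  unfold Spec_encode_tetramer encode_tetramer encode_tetramer_alt
  have hB := lemB sequence.toList []
  simp only [pvFlush, List.nil_append] at hB
  rw [lemA sequence.toList, ← hB]
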